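-- pv_equiv track=rewrite | github.com/buildwithsuhana/keras | examples/demo_torch_distributed.py | convert_keras_path_to_torch
-- ===== SOURCE A (Python) =====
-- def convert_keras_path_to_torch(keras_path):
--     """Convert Keras layer parameter path to PyTorch format.
--
--     Keras uses '/' separators (e.g., 'dense/kernel', 'dense_1/bias')
--     PyTorch uses '.' separators (e.g., 'dense.weight', 'dense_1.bias')
--     """
--     # Basic conversion
--     torch_path = keras_path.replace('/', '.')
--
--     # Handle parameter name mapping
--     replacements = [
--         ('.kernel', '.weight'),
--         ('.gamma', '.weight'),
--         ('.beta', '.bias'),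
--         ('.moving_mean', '.running_mean'),
--         ('.moving_var', '.running_var'),
--     ]
--
--     for old, new in replacements:
--         if torch_path.endswith(old):
--             torch_path = torch_path[:-len(old)] + new
--             break
--
--     return torch_path
-- ===== SOURCE B (Python) =====
-- _PARAM_MAP = {
--     "kernel": "weight",
--     "gamma": "weight",
--     "beta": "bias",
--     "moving_mean": "running_mean",
--     "moving_var": "running_var",
-- }
--
--
-- def convert_keras_path_to_torch(keras_path):
--     """Convert Keras layer parameter path to PyTorch format."""
--     torch_path = keras_path.replace("/", ".")
--     head, sep, tail = torch_path.rpartition(".")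
--     mapped = _PARAM_MAP.get(tail)
--     if sep and mapped is not None:
--         return head + "." + mapped
--     return torch_path
-- ===== Notes on version B (the rewrite author's own statement) =====
-- stated objective: idiomatic
-- what changed: B replaces A's five-way endswith scan (with slice surgery per suffix) by one rpartition that isolates the final dot-separated segment and a single dict lookup to remap it.
import Mathlib
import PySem

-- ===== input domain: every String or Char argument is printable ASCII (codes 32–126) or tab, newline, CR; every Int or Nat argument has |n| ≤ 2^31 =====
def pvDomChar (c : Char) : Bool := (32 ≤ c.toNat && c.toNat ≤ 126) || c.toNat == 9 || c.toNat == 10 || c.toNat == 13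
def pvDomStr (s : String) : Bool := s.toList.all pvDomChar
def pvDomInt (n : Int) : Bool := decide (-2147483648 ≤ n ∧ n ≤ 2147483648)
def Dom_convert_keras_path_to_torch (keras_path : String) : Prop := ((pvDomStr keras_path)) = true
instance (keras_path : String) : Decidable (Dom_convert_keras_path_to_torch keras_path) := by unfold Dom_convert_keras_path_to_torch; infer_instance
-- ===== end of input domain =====

-- B replaces A's five-way endswith scan by an rpartition of the last dot-segment plus one table lookup (idiomatic; same cost).

-- ===== PORT A =====
-- literal port of A: replace '/'→'.', then the unrolled for-loop over the five (old, new)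
-- suffix pairs with break = an if-chain; torch_path[:-len(old)] is the negative-stop slice.
def convert_keras_path_to_torch (keras_path : String) : String :=
  let t := PySem.Chars.replace keras_path.toList "/".toList ".".toList
  let t :=
    if PySem.Chars.endswith t ".kernel".toList then
      PySem.List.slice t none (some (-7)) ++ ".weight".toList
    else if PySem.Chars.endswith t ".gamma".toList then
      PySem.List.slice t none (some (-6)) ++ ".weight".toList
    else if PySem.Chars.endswith t ".beta".toList then
      PySem.List.slice t none (some (-5)) ++ ".bias".toList
    else if PySem.Chars.endswith t ".moving_mean".toList then
      PySem.List.slice t none (some (-12)) ++ ".running_mean".toList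
    else if PySem.Chars.endswith t ".moving_var".toList then
      PySem.List.slice t none (some (-11)) ++ ".running_var".toList
    else t
  String.mk t

-- ===== PORT B =====
def pvParamMap : PySem.Dict String String :=
  PySem.Dict.ofList [("kernel", "weight"), ("gamma", "weight"), ("beta", "bias"),
    ("moving_mean", "running_mean"), ("moving_var", "running_var")]

-- port of B: torch_path.rpartition('.') is ported by hand (PySem has no rpartition); for the
-- single-char separator '.' it is exact: tail = maximal dot-free suffix, sep nonempty iff
-- tail is shorter than the whole string, head = everything before the last '.'.
def convert_keras_path_to_torch_alt (keras_path : String) : String :=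
  let t := PySem.Chars.replace keras_path.toList "/".toList ".".toList
  let tail := (t.reverse.takeWhile (· ≠ '.')).reverse
  let mapped := pvParamMap.get? (String.mk tail)
  if tail.length < t.length then
    match mapped with
    | some m => String.mk (t.take (t.length - tail.length - 1) ++ ['.'] ++ m.toList)
    | none => String.mk t
  else String.mk t

-- ===== PRECONDITION & SPEC =====
def Spec_convert_keras_path_to_torch (keras_path : String) (out : String) : Prop := out = convert_keras_path_to_torch_alt keras_path
instance (keras_path : String) (out : String) : Decidable (Spec_convert_keras_path_to_torch keras_path out) := by unfold Spec_convert_keras_path_to_torch; infer_instance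

-- ===== CLAIM (what is proved, stated in full; the proofs are below) =====
def Claim_equal_convert_keras_path_to_torch : Prop := ∀ (keras_path : String), Dom_convert_keras_path_to_torch keras_path → Spec_convert_keras_path_to_torch keras_path (convert_keras_path_to_torch keras_path)

-- ===== LEMMAS AND PROOFS =====

-- t[:-n] for 0 < n ≤ len(t) is take (len - n)
theorem pv_slice_neg (l : List Char) (n : Nat) (h0 : 0 < n) (h : n ≤ l.length) :
    PySem.List.slice l none (some (-(n : Int))) = l.take (l.length - n) := by
  simp only [PySem.List.slice, PySem.List.clampIdx]
  norm_num
  split_ifs <;> omega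

-- endswith('.w') for dot-free w holds iff a '.' occurs and the maximal dot-free suffix is w
theorem pv_endswith_iff (t w : List Char) (hw : '.' ∉ w) :
    PySem.Chars.endswith t ('.' :: w) = true ↔
      ('.' ∈ t ∧ t.reverse.takeWhile (· ≠ '.') = w.reverse) := by
  rw [PySem.Chars.endswith_iff]
  constructor
  · rintro ⟨pre, rfl⟩
    constructor
    · simp
    · rw [List.reverse_append]
      have h1 : ('.' :: w).reverse = w.reverse ++ ['.'] := by simp
      rw [h1, List.append_assoc,
        List.takeWhile_append_of_pos (by
          intro x hx
          simp only [ne_eq, decide_eq_true_eq]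
          intro hxe; exact hw (by simpa [hxe] using (List.mem_reverse.mp hx)))]
      simp
  · rintro ⟨hdot, htw⟩
    have hsplit := List.takeWhile_append_dropWhile (p := (· ≠ '.')) (l := t.reverse)
    have hne : t.reverse.dropWhile (· ≠ '.') ≠ [] := by
      intro hnil
      rw [hnil, List.append_nil] at hsplit
      have hmem : '.' ∈ t.reverse.takeWhile (· ≠ '.') := by
        rw [hsplit]; exact List.mem_reverse.mpr hdot
      have := List.mem_takeWhile_imp hmem
      simp at this
    obtain ⟨d, rest, hcons⟩ := List.exists_cons_of_ne_nil hne
    have hd : d = '.' := by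
      have h2 := List.head_dropWhile_not (p := (· ≠ '.')) hne
      simp only [hcons, List.head_cons] at h2
      simpa using h2
    subst hd
    have ht : t.reverse = w.reverse ++ '.' :: rest := by
      rw [← htw, ← hcons]; exact hsplit.symm
    refine ⟨rest.reverse, ?_⟩
    have := congrArg List.reverse ht
    simpa using this.symm

-- if a '.' occurs, the maximal dot-free suffix is a proper suffix
theorem pv_tail_lt (t : List Char) (hdot : '.' ∈ t) :
    (t.reverse.takeWhile (· ≠ '.')).length < t.length := by
  have hpre : t.reverse.takeWhile (· ≠ '.') <+: t.reverse := List.takeWhile_prefix _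
  have hle : (t.reverse.takeWhile (· ≠ '.')).length ≤ t.length := by
    simpa using hpre.length_le
  rcases Nat.lt_or_ge (t.reverse.takeWhile (· ≠ '.')).length t.length with h | h
  · exact h
  · exfalso
    have heq : t.reverse.takeWhile (· ≠ '.') = t.reverse :=
      hpre.eq_of_length (by simpa using le_antisymm hle h)
    have hmem : '.' ∈ t.reverse.takeWhile (· ≠ '.') := by
      rw [heq]; exact List.mem_reverse.mpr hdot
    have := List.mem_takeWhile_imp hmem
    simp at this


theorem pv_toList_mk (l : List Char) : (String.mk l).toList = l := Eq.symm (String.ofList_eq.mp rfl)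

theorem pv_beq_false (tail : List Char) (k : String) (hk : tail ≠ k.toList) : (k == String.mk tail) = false := by
  rw [beq_eq_false_iff_ne]
  intro he
  have := congrArg String.toList he
  rw [pv_toList_mk] at this
  exact hk this.symm

theorem pv_get_none (tail : List Char) (h1 : tail ≠ "kernel".toList) (h2 : tail ≠ "gamma".toList)
    (h3 : tail ≠ "beta".toList) (h4 : tail ≠ "moving_mean".toList) (h5 : tail ≠ "moving_var".toList) :
    pvParamMap.get? (String.mk tail) = none := by
  have hmk : pvParamMap = PySem.Dict.mk [("kernel", "weight"), ("gamma", "weight"), ("beta", "bias"), ("moving_mean", "running_mean"), ("moving_var", "running_var")] := rfl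
  rw [hmk]
  simp [PySem.Dict.get?_mk_cons, pv_beq_false _ _ h1, pv_beq_false _ _ h2, pv_beq_false _ _ h3, pv_beq_false _ _ h4, pv_beq_false _ _ h5]
  rfl

theorem pv_end_false (t w : List Char) (hw : '.' ∉ w)
    (h : ¬ ('.' ∈ t ∧ t.reverse.takeWhile (· ≠ '.') = w.reverse)) :
    PySem.Chars.endswith t ('.' :: w) = false := by
  rw [Bool.eq_false_iff]
  intro htrue
  exact h ((pv_endswith_iff t w hw).mp htrue)

-- the shared core: the two post-replace computations agree on every character list
theorem pv_core (t : List Char) :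
    String.mk
      (if PySem.Chars.endswith t ".kernel".toList then
        PySem.List.slice t none (some (-7)) ++ ".weight".toList
      else if PySem.Chars.endswith t ".gamma".toList then
        PySem.List.slice t none (some (-6)) ++ ".weight".toList
      else if PySem.Chars.endswith t ".beta".toList then
        PySem.List.slice t none (some (-5)) ++ ".bias".toList
      else if PySem.Chars.endswith t ".moving_mean".toList then
        PySem.List.slice t none (some (-12)) ++ ".running_mean".toList
      else if PySem.Chars.endswith t ".moving_var".toList then
        PySem.List.slice t none (some (-11)) ++ ".running_var".toList
      else t) =
    (if ((t.reverse.takeWhile (· ≠ '.')).reverse).length < t.length then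
      match pvParamMap.get? (String.mk ((t.reverse.takeWhile (· ≠ '.')).reverse)) with
      | some m => String.mk (t.take (t.length - ((t.reverse.takeWhile (· ≠ '.')).reverse).length - 1) ++ ['.'] ++ m.toList)
      | none => String.mk t
    else String.mk t) := by
  by_cases hdot : '.' ∈ t
  · have hlt := pv_tail_lt t hdot
    by_cases hk1 : t.reverse.takeWhile (· ≠ '.') = "kernel".toList.reverse
    · -- last segment 'kernel'
      have b : PySem.Chars.endswith t ".kernel".toList = true := by
        rw [show ".kernel".toList = '.' :: "kernel".toList from rfl]
        exact (pv_endswith_iff t _ (by decide)).mpr ⟨hdot, hk1⟩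
      have hsuf : ('.' :: "kernel".toList) <:+ t := by
        rw [show ".kernel".toList = '.' :: "kernel".toList from rfl] at b
        exact (PySem.Chars.endswith_iff t _).mp b
      have hlen : 7 ≤ t.length := by simpa using hsuf.length_le
      rw [if_pos b]
      rw [show (-(7) : Int) = -((7 : Nat) : Int) from by norm_num,
        pv_slice_neg t 7 (by norm_num) hlen]
      rw [hk1]
      simp only [List.reverse_reverse]
      have hc : ("kernel".toList).length < t.length := by
        have h6 : ("kernel".toList).length = 6 := rfl
        omega
      rw [if_pos hc]
      have hg : pvParamMap.get? (String.mk "kernel".toList) = some "weight" := rfl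
      rw [hg]
      have hnum : t.length - 7 = t.length - ("kernel".toList).length - 1 := by
        have h6 : ("kernel".toList).length = 6 := rfl
        omega
      rw [hnum]
      simp [List.append_assoc]
    by_cases hk2 : t.reverse.takeWhile (· ≠ '.') = "gamma".toList.reverse
    · -- last segment 'gamma'
      have f1 : PySem.Chars.endswith t ".kernel".toList = false := by
        rw [show ".kernel".toList = '.' :: "kernel".toList from rfl]
        exact pv_end_false t _ (by decide) (fun hc => hk1 hc.2)
      have b : PySem.Chars.endswith t ".gamma".toList = true := by
        rw [show ".gamma".toList = '.' :: "gamma".toList from rfl]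
        exact (pv_endswith_iff t _ (by decide)).mpr ⟨hdot, hk2⟩
      have hsuf : ('.' :: "gamma".toList) <:+ t := by
        rw [show ".gamma".toList = '.' :: "gamma".toList from rfl] at b
        exact (PySem.Chars.endswith_iff t _).mp b
      have hlen : 6 ≤ t.length := by simpa using hsuf.length_le
      rw [if_neg (ne_true_of_eq_false f1)]
      rw [if_pos b]
      rw [show (-(6) : Int) = -((6 : Nat) : Int) from by norm_num,
        pv_slice_neg t 6 (by norm_num) hlen]
      rw [hk2]
      simp only [List.reverse_reverse]
      have hc : ("gamma".toList).length < t.length := by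
        have h6 : ("gamma".toList).length = 5 := rfl
        omega
      rw [if_pos hc]
      have hg : pvParamMap.get? (String.mk "gamma".toList) = some "weight" := rfl
      rw [hg]
      have hnum : t.length - 6 = t.length - ("gamma".toList).length - 1 := by
        have h6 : ("gamma".toList).length = 5 := rfl
        omega
      rw [hnum]
      simp [List.append_assoc]
    by_cases hk3 : t.reverse.takeWhile (· ≠ '.') = "beta".toList.reverse
    · -- last segment 'beta'
      have f1 : PySem.Chars.endswith t ".kernel".toList = false := by
        rw [show ".kernel".toList = '.' :: "kernel".toList from rfl]
        exact pv_end_false t _ (by decide) (fun hc => hk1 hc.2)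
      have f2 : PySem.Chars.endswith t ".gamma".toList = false := by
        rw [show ".gamma".toList = '.' :: "gamma".toList from rfl]
        exact pv_end_false t _ (by decide) (fun hc => hk2 hc.2)
      have b : PySem.Chars.endswith t ".beta".toList = true := by
        rw [show ".beta".toList = '.' :: "beta".toList from rfl]
        exact (pv_endswith_iff t _ (by decide)).mpr ⟨hdot, hk3⟩
      have hsuf : ('.' :: "beta".toList) <:+ t := by
        rw [show ".beta".toList = '.' :: "beta".toList from rfl] at b
        exact (PySem.Chars.endswith_iff t _).mp b
      have hlen : 5 ≤ t.length := by simpa using hsuf.length_le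
      rw [if_neg (ne_true_of_eq_false f1)]
      rw [if_neg (ne_true_of_eq_false f2)]
      rw [if_pos b]
      rw [show (-(5) : Int) = -((5 : Nat) : Int) from by norm_num,
        pv_slice_neg t 5 (by norm_num) hlen]
      rw [hk3]
      simp only [List.reverse_reverse]
      have hc : ("beta".toList).length < t.length := by
        have h6 : ("beta".toList).length = 4 := rfl
        omega
      rw [if_pos hc]
      have hg : pvParamMap.get? (String.mk "beta".toList) = some "bias" := rfl
      rw [hg]
      have hnum : t.length - 5 = t.length - ("beta".toList).length - 1 := by
        have h6 : ("beta".toList).length = 4 := rfl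
        omega
      rw [hnum]
      simp [List.append_assoc]
    by_cases hk4 : t.reverse.takeWhile (· ≠ '.') = "moving_mean".toList.reverse
    · -- last segment 'moving_mean'
      have f1 : PySem.Chars.endswith t ".kernel".toList = false := by
        rw [show ".kernel".toList = '.' :: "kernel".toList from rfl]
        exact pv_end_false t _ (by decide) (fun hc => hk1 hc.2)
      have f2 : PySem.Chars.endswith t ".gamma".toList = false := by
        rw [show ".gamma".toList = '.' :: "gamma".toList from rfl]
        exact pv_end_false t _ (by decide) (fun hc => hk2 hc.2)
      have f3 : PySem.Chars.endswith t ".beta".toList = false := by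
        rw [show ".beta".toList = '.' :: "beta".toList from rfl]
        exact pv_end_false t _ (by decide) (fun hc => hk3 hc.2)
      have b : PySem.Chars.endswith t ".moving_mean".toList = true := by
        rw [show ".moving_mean".toList = '.' :: "moving_mean".toList from rfl]
        exact (pv_endswith_iff t _ (by decide)).mpr ⟨hdot, hk4⟩
      have hsuf : ('.' :: "moving_mean".toList) <:+ t := by
        rw [show ".moving_mean".toList = '.' :: "moving_mean".toList from rfl] at b
        exact (PySem.Chars.endswith_iff t _).mp b
      have hlen : 12 ≤ t.length := by simpa using hsuf.length_le
      rw [if_neg (ne_true_of_eq_false f1)]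
      rw [if_neg (ne_true_of_eq_false f2)]
      rw [if_neg (ne_true_of_eq_false f3)]
      rw [if_pos b]
      rw [show (-(12) : Int) = -((12 : Nat) : Int) from by norm_num,
        pv_slice_neg t 12 (by norm_num) hlen]
      rw [hk4]
      simp only [List.reverse_reverse]
      have hc : ("moving_mean".toList).length < t.length := by
        have h6 : ("moving_mean".toList).length = 11 := rfl
        omega
      rw [if_pos hc]
      have hg : pvParamMap.get? (String.mk "moving_mean".toList) = some "running_mean" := rfl
      rw [hg]
      have hnum : t.length - 12 = t.length - ("moving_mean".toList).length - 1 := by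
        have h6 : ("moving_mean".toList).length = 11 := rfl
        omega
      rw [hnum]
      simp [List.append_assoc]
    by_cases hk5 : t.reverse.takeWhile (· ≠ '.') = "moving_var".toList.reverse
    · -- last segment 'moving_var'
      have f1 : PySem.Chars.endswith t ".kernel".toList = false := by
        rw [show ".kernel".toList = '.' :: "kernel".toList from rfl]
        exact pv_end_false t _ (by decide) (fun hc => hk1 hc.2)
      have f2 : PySem.Chars.endswith t ".gamma".toList = false := by
        rw [show ".gamma".toList = '.' :: "gamma".toList from rfl]
        exact pv_end_false t _ (by decide) (fun hc => hk2 hc.2)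
      have f3 : PySem.Chars.endswith t ".beta".toList = false := by
        rw [show ".beta".toList = '.' :: "beta".toList from rfl]
        exact pv_end_false t _ (by decide) (fun hc => hk3 hc.2)
      have f4 : PySem.Chars.endswith t ".moving_mean".toList = false := by
        rw [show ".moving_mean".toList = '.' :: "moving_mean".toList from rfl]
        exact pv_end_false t _ (by decide) (fun hc => hk4 hc.2)
      have b : PySem.Chars.endswith t ".moving_var".toList = true := by
        rw [show ".moving_var".toList = '.' :: "moving_var".toList from rfl]
        exact (pv_endswith_iff t _ (by decide)).mpr ⟨hdot, hk5⟩
      have hsuf : ('.' :: "moving_var".toList) <:+ t := by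
        rw [show ".moving_var".toList = '.' :: "moving_var".toList from rfl] at b
        exact (PySem.Chars.endswith_iff t _).mp b
      have hlen : 11 ≤ t.length := by simpa using hsuf.length_le
      rw [if_neg (ne_true_of_eq_false f1)]
      rw [if_neg (ne_true_of_eq_false f2)]
      rw [if_neg (ne_true_of_eq_false f3)]
      rw [if_neg (ne_true_of_eq_false f4)]
      rw [if_pos b]
      rw [show (-(11) : Int) = -((11 : Nat) : Int) from by norm_num,
        pv_slice_neg t 11 (by norm_num) hlen]
      rw [hk5]
      simp only [List.reverse_reverse]
      have hc : ("moving_var".toList).length < t.length := by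
        have h6 : ("moving_var".toList).length = 10 := rfl
        omega
      rw [if_pos hc]
      have hg : pvParamMap.get? (String.mk "moving_var".toList) = some "running_var" := rfl
      rw [hg]
      have hnum : t.length - 11 = t.length - ("moving_var".toList).length - 1 := by
        have h6 : ("moving_var".toList).length = 10 := rfl
        omega
      rw [hnum]
      simp [List.append_assoc]
    -- last segment matches no table key: both sides return t
    have f1 : PySem.Chars.endswith t ".kernel".toList = false := by
      rw [show ".kernel".toList = '.' :: "kernel".toList from rfl]
      exact pv_end_false t _ (by decide) (fun hc => hk1 hc.2)
    have f2 : PySem.Chars.endswith t ".gamma".toList = false := by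
      rw [show ".gamma".toList = '.' :: "gamma".toList from rfl]
      exact pv_end_false t _ (by decide) (fun hc => hk2 hc.2)
    have f3 : PySem.Chars.endswith t ".beta".toList = false := by
      rw [show ".beta".toList = '.' :: "beta".toList from rfl]
      exact pv_end_false t _ (by decide) (fun hc => hk3 hc.2)
    have f4 : PySem.Chars.endswith t ".moving_mean".toList = false := by
      rw [show ".moving_mean".toList = '.' :: "moving_mean".toList from rfl]
      exact pv_end_false t _ (by decide) (fun hc => hk4 hc.2)
    have f5 : PySem.Chars.endswith t ".moving_var".toList = false := by
      rw [show ".moving_var".toList = '.' :: "moving_var".toList from rfl]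
      exact pv_end_false t _ (by decide) (fun hc => hk5 hc.2)
    have g1 : (t.reverse.takeWhile (· ≠ '.')).reverse ≠ "kernel".toList := by
      intro h
      apply hk1
      rw [← h, List.reverse_reverse]
    have g2 : (t.reverse.takeWhile (· ≠ '.')).reverse ≠ "gamma".toList := by
      intro h
      apply hk2
      rw [← h, List.reverse_reverse]
    have g3 : (t.reverse.takeWhile (· ≠ '.')).reverse ≠ "beta".toList := by
      intro h
      apply hk3
      rw [← h, List.reverse_reverse]
    have g4 : (t.reverse.takeWhile (· ≠ '.')).reverse ≠ "moving_mean".toList := by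
      intro h
      apply hk4
      rw [← h, List.reverse_reverse]
    have g5 : (t.reverse.takeWhile (· ≠ '.')).reverse ≠ "moving_var".toList := by
      intro h
      apply hk5
      rw [← h, List.reverse_reverse]
    have hlt' : ((t.reverse.takeWhile (· ≠ '.')).reverse).length < t.length := by simpa using hlt
    rw [if_neg (ne_true_of_eq_false f1)]
    rw [if_neg (ne_true_of_eq_false f2)]
    rw [if_neg (ne_true_of_eq_false f3)]
    rw [if_neg (ne_true_of_eq_false f4)]
    rw [if_neg (ne_true_of_eq_false f5)]
    rw [if_pos hlt']
    rw [pv_get_none _ g1 g2 g3 g4 g5]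
  · -- no '.' in t: every endswith is false and tail = t, so both sides return t
    have htw : t.reverse.takeWhile (· ≠ '.') = t.reverse := by
      apply List.takeWhile_eq_self_iff.mpr
      intro x hx
      simp only [ne_eq, decide_eq_true_eq]
      intro he
      exact hdot (by simpa [he] using List.mem_reverse.mp hx)

    have f1 : PySem.Chars.endswith t ".kernel".toList = false := by
      rw [show ".kernel".toList = '.' :: "kernel".toList from rfl]
      exact pv_end_false t _ (by decide) (fun hc => hdot hc.1)
    have f2 : PySem.Chars.endswith t ".gamma".toList = false := by
      rw [show ".gamma".toList = '.' :: "gamma".toList from rfl]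
      exact pv_end_false t _ (by decide) (fun hc => hdot hc.1)
    have f3 : PySem.Chars.endswith t ".beta".toList = false := by
      rw [show ".beta".toList = '.' :: "beta".toList from rfl]
      exact pv_end_false t _ (by decide) (fun hc => hdot hc.1)
    have f4 : PySem.Chars.endswith t ".moving_mean".toList = false := by
      rw [show ".moving_mean".toList = '.' :: "moving_mean".toList from rfl]
      exact pv_end_false t _ (by decide) (fun hc => hdot hc.1)
    have f5 : PySem.Chars.endswith t ".moving_var".toList = false := by
      rw [show ".moving_var".toList = '.' :: "moving_var".toList from rfl]
      exact pv_end_false t _ (by decide) (fun hc => hdot hc.1)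
    have hnlt : ¬ ((t.reverse.takeWhile (· ≠ '.')).reverse).length < t.length := by
      rw [htw]
      simp
    rw [if_neg (ne_true_of_eq_false f1)]
    rw [if_neg (ne_true_of_eq_false f2)]
    rw [if_neg (ne_true_of_eq_false f3)]
    rw [if_neg (ne_true_of_eq_false f4)]
    rw [if_neg (ne_true_of_eq_false f5)]
    rw [if_neg hnlt]

-- ===== VERDICT (by name: the statement is the Claim_ definition above) =====
theorem convert_keras_path_to_torch_spec : Claim_equal_convert_keras_path_to_torch := by
  intro s _
  unfold Spec_convert_keras_path_to_torch convert_keras_path_to_torch convert_keras_path_to_torch_alt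
  exact pv_core _
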